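-- pv_equiv track=rewrite | github.com/tilde-lab/tilde | tilde/core/common.py | str2html
-- ===== SOURCE A (Python) =====
-- def str2html(s, units=True):
--     tokens = {
--     ',,': '<sub>',
--     '__': '</sub>',
--     '^^': '<sup>',
--     '**': '</sup>',
--     '{{units-energy}}': ''
--     }
--     if units: tokens['{{units-energy}}'] = ', <span class=units-energy></span>'
--     for k, v in tokens.items():
--         s = s.replace(k, v)
--     return s
-- ===== SOURCE B (Python) =====
-- import re
--
-- _TAGS = {
--     ',,': '<sub>',
--     '__': '</sub>',
--     '^^': '<sup>',
--     '**': '</sup>',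
-- }
--
-- _TOKEN_RE = re.compile('|'.join(re.escape(k) for k in list(_TAGS) + ['{{units-energy}}']))
--
-- def str2html(s, units=True):
--     rep = dict(_TAGS)
--     rep['{{units-energy}}'] = ', <span class=units-energy></span>' if units else ''
--     return _TOKEN_RE.sub(lambda m: rep[m.group(0)], s)
-- ===== Notes on version B (the rewrite author's own statement) =====
-- stated objective: idiomatic
-- what changed: A makes five sequential full passes over the string (one str.replace per token); B compiles one regex alternating over the escaped tokens and performs a single left-to-right re.sub scan with a token-to-tag dict.
import Mathlib
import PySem

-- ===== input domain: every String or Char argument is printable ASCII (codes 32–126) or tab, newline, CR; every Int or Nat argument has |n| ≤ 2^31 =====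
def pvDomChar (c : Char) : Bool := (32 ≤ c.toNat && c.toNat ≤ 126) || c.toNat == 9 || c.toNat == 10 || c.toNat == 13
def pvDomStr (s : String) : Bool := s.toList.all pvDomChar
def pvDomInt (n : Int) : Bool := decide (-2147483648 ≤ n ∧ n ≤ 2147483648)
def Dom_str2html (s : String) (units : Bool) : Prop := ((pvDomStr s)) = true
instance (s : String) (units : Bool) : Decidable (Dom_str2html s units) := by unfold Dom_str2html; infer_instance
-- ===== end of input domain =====

-- B replaces A's five sequential str.replace passes by ONE left-to-right scan (in Python: a single
-- compiled-regex re.sub over the alternation of the five tokens); equal output, same O(n) cost class.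

-- ===== PORT A =====
-- A builds a dict of token → tag (overwriting the units entry when units is truthy) and applies
-- s.replace(k, v) once per item, in dict insertion order.
def str2html (s : String) (units : Bool) : String :=
  let tokens : PySem.Dict String String :=
    (((((PySem.Dict.empty).insert ",," "<sub>").insert "__" "</sub>").insert "^^" "<sup>").insert "**" "</sup>").insert "{{units-energy}}" ""
  let tokens := if units then tokens.insert "{{units-energy}}" ", <span class=units-energy></span>" else tokens
  tokens.items.foldl (fun acc kv => PySem.Str.replace acc kv.1 kv.2) s

-- ===== PORT B =====
-- B's re.sub scan, ported by hand (no regex engine in Lean): at each position try the five tokens in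
-- alternation order (exactly re.sub's leftmost, first-alternative, non-overlapping rule — exact here
-- because the pattern is a plain alternation of fixed words), emit the tag and skip the token on a
-- match, otherwise keep one character and move on.
def tok5 : List Char := ['{','{','u','n','i','t','s','-','e','n','e','r','g','y','}','}']
def rep5 : List Char := [',',' ','<','s','p','a','n',' ','c','l','a','s','s','=','u','n','i','t','s','-','e','n','e','r','g','y','>','<','/','s','p','a','n','>']

def scanTokens (units : Bool) (l : List Char) : List Char :=
  match l with
  | [] => []
  | c :: rest =>
    if ([',', ','] : List Char).isPrefixOf (c :: rest) then
      ['<','s','u','b','>'] ++ scanTokens units ((c :: rest).drop 2)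
    else if (['_', '_'] : List Char).isPrefixOf (c :: rest) then
      ['<','/','s','u','b','>'] ++ scanTokens units ((c :: rest).drop 2)
    else if (['^', '^'] : List Char).isPrefixOf (c :: rest) then
      ['<','s','u','p','>'] ++ scanTokens units ((c :: rest).drop 2)
    else if (['*', '*'] : List Char).isPrefixOf (c :: rest) then
      ['<','/','s','u','p','>'] ++ scanTokens units ((c :: rest).drop 2)
    else if tok5.isPrefixOf (c :: rest) then
      (if units then rep5 else []) ++ scanTokens units ((c :: rest).drop 16)
    else
      c :: scanTokens units rest
termination_by l.length
decreasing_by all_goals simp [List.length_drop]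


def str2html_alt (s : String) (units : Bool) : String :=
  String.ofList (scanTokens units s.toList)

-- ===== PRECONDITION & SPEC =====
def Spec_str2html (s : String) (units : Bool) (out : String) : Prop := out = str2html_alt s units
instance (s : String) (units : Bool) (out : String) : Decidable (Spec_str2html s units out) := by unfold Spec_str2html; infer_instance

-- ===== CLAIM (what is proved, stated in full; the proofs are below) =====
def Claim_equal_str2html : Prop := ∀ (s : String) (units : Bool), Dom_str2html s units → Spec_str2html s units (str2html s units)

-- ===== LEMMAS AND PROOFS =====

theorem go_acc (old new : List Char) : ∀ (fuel : Nat) (l acc : List Char),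
    PySem.Chars.replace.go old new fuel l acc = acc.reverse ++ PySem.Chars.replace.go old new fuel l [] := by
  intro fuel
  induction fuel with
  | zero => intro l acc; simp [PySem.Chars.replace.go]
  | succ n ih =>
    intro l acc
    cases l with
    | nil => simp [PySem.Chars.replace.go]
    | cons c t =>
      simp only [PySem.Chars.replace.go]
      by_cases h : old.isPrefixOf (c :: t)
      · simp only [h, if_true]
        rw [ih _ (new.reverse ++ acc), ih _ (new.reverse ++ [])]
        simp
      · simp only [h]
        rw [ih t (c :: acc), ih t [c]]
        simp

theorem go_fuel (old new : List Char) (hold : old ≠ []) : ∀ (fuel fuel' : Nat) (l acc : List Char),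
    l.length ≤ fuel → l.length ≤ fuel' →
    PySem.Chars.replace.go old new fuel l acc = PySem.Chars.replace.go old new fuel' l acc := by
  intro fuel
  induction fuel with
  | zero =>
    intro fuel' l acc h1 h2
    have : l = [] := by cases l <;> simp_all
    subst this
    cases fuel' <;> simp [PySem.Chars.replace.go]
  | succ n ih =>
    intro fuel' l acc h1 h2
    cases l with
    | nil => cases fuel' <;> simp [PySem.Chars.replace.go]
    | cons c t =>
      cases fuel' with
      | zero => simp at h2
      | succ m =>
        simp only [PySem.Chars.replace.go]
        by_cases h : old.isPrefixOf (c :: t)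
        · simp only [h, if_true]
          apply ih
          · have hlen : old.length ≥ 1 := by cases old <;> simp_all
            simp only [List.length_drop, List.length_cons]
            simp only [List.length_cons] at h1; omega
          · have hlen : old.length ≥ 1 := by cases old <;> simp_all
            simp only [List.length_drop, List.length_cons]
            simp only [List.length_cons] at h2; omega
        · simp only [h]
          apply ih <;> simp_all

theorem replace_nil (old new : List Char) (hold : old ≠ []) :
    PySem.Chars.replace [] old new = [] := by
  simp [PySem.Chars.replace, PySem.Chars.replace.go, List.isEmpty_iff, hold]

theorem replace_cons_neg (old new : List Char) (c : Char) (t : List Char) (hold : old ≠ [])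
    (h : ¬ old.isPrefixOf (c :: t)) :
    PySem.Chars.replace (c :: t) old new = c :: PySem.Chars.replace t old new := by
  simp only [PySem.Chars.replace, List.isEmpty_iff, hold, if_false]
  simp only [List.length_cons, PySem.Chars.replace.go, h]
  rw [go_acc old new t.length t [c]]
  simp

theorem replace_match (old new X : List Char) (hold : old ≠ []) :
    PySem.Chars.replace (old ++ X) old new = new ++ PySem.Chars.replace X old new := by
  simp only [PySem.Chars.replace, List.isEmpty_iff, hold, if_false]
  obtain ⟨c, t, rfl⟩ : ∃ c t, old = c :: t := by cases old with | nil => simp_all | cons a b => exact ⟨a, b, rfl⟩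
  simp only [List.cons_append, List.length_cons, List.length_append]
  simp only [PySem.Chars.replace.go]
  have hpre : (c :: t).isPrefixOf ((c :: t) ++ X) = true := by
    simp [List.isPrefixOf_iff_prefix]
  simp only [List.cons_append] at hpre
  simp only [hpre, if_true]
  have hd : List.drop (c :: t).length (c :: (t ++ X)) = X := by
    simpa using List.drop_left (c :: t) X
  rw [hd, go_acc]
  rw [go_fuel (c :: t) new (by simp) _ X.length X [] (by omega) (le_refl _)]
  simp

theorem replace_passthrough (c0 : Char) (ot new : List Char) :
    ∀ (u X : List Char), (∀ a ∈ u, a ≠ c0) →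
    PySem.Chars.replace (u ++ X) (c0 :: ot) new = u ++ PySem.Chars.replace X (c0 :: ot) new := by
  intro u
  induction u with
  | nil => simp
  | cons a u' ih =>
    intro X hu
    have ha : a ≠ c0 := hu a (by simp)
    have hnp : ¬ (c0 :: ot).isPrefixOf (a :: (u' ++ X)) := by
      simp [List.isPrefixOf_cons₂]
      intro h; exact absurd h.symm ha
    rw [List.cons_append, replace_cons_neg _ _ _ _ (by simp) hnp, ih X (fun b hb => hu b (by simp [hb]))]
    simp

theorem replace_prefix_reflect (old new : List Char) (hold : old ≠ []) (nt : List Char)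
    (hnew : new = '<' :: nt) :
    ∀ (X w : List Char), '<' ∉ w → w.isPrefixOf (PySem.Chars.replace X old new) → w.isPrefixOf X := by
  intro X
  induction X with
  | nil =>
    intro w hw h
    rwa [replace_nil _ _ hold] at h
  | cons c t ih =>
    intro w hw h
    by_cases hp : old.isPrefixOf (c :: t)
    · obtain ⟨X', hX'⟩ : ∃ X', c :: t = old ++ X' :=
        ⟨List.drop old.length (c :: t), ((List.prefix_iff_eq_append.mp (List.isPrefixOf_iff_prefix.mp hp))).symm⟩
      rw [hX'] at h ⊢
      cases w with
      | nil => simp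
      | cons a w' =>
        rw [replace_match _ _ _ hold, hnew] at h
        simp [List.isPrefixOf_cons₂] at h  -- hmm: new ++ ... = '<' :: (nt ++ ...)
        exact absurd h.1.symm (by intro he; exact hw (by simp; exact Or.inl he))
    · rw [replace_cons_neg _ _ _ _ hold hp] at h
      cases w with
      | nil => simp
      | cons a w' =>
        simp only [List.isPrefixOf_cons₂] at h ⊢
        obtain ⟨h1, h2⟩ := by simpa using h
        have h2' : w'.isPrefixOf (PySem.Chars.replace t old new) = true := by
          simpa [List.isPrefixOf_iff_prefix] using h2
        have := ih w' (by intro hm; exact hw (by simp [hm])) h2'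
        simp [h1, List.isPrefixOf_iff_prefix] at this ⊢
        exact this

set_option maxRecDepth 2048 in
theorem chars_main (units : Bool) : ∀ (n : Nat) (l : List Char), l.length ≤ n →
    PySem.Chars.replace (PySem.Chars.replace (PySem.Chars.replace (PySem.Chars.replace
      (PySem.Chars.replace l [',',','] ['<','s','u','b','>'])
      ['_','_'] ['<','/','s','u','b','>'])
      ['^','^'] ['<','s','u','p','>'])
      ['*','*'] ['<','/','s','u','p','>'])
      tok5 (if units then rep5 else [])
    = scanTokens units l := by
  intro n
  induction n with
  | zero =>
    intro l hl
    have : l = [] := by cases l <;> simp_all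
    subst this
    rw [replace_nil _ _ (by simp), replace_nil _ _ (by simp), replace_nil _ _ (by simp),
        replace_nil _ _ (by simp), replace_nil _ _ (by simp [tok5]), scanTokens]
  | succ n ih =>
    intro l hl
    by_cases hp1 : ([',', ','] : List Char).isPrefixOf l
    · obtain ⟨m, rfl⟩ : ∃ m, l = [',', ','] ++ m :=
        ⟨List.drop 2 l, by simpa using (List.prefix_iff_eq_append.mp (List.isPrefixOf_iff_prefix.mp hp1)).symm⟩
      rw [replace_match _ _ _ (by simp),
          replace_passthrough '_' ['_'] _ ['<','s','u','b','>'] _ (by simp),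
          replace_passthrough '^' ['^'] _ ['<','s','u','b','>'] _ (by simp),
          replace_passthrough '*' ['*'] _ ['<','s','u','b','>'] _ (by simp),
          show tok5 = '{' :: ['{','u','n','i','t','s','-','e','n','e','r','g','y','}','}'] from rfl,
          replace_passthrough '{' _ _ ['<','s','u','b','>'] _ (by simp),
          show ('{' :: ['{','u','n','i','t','s','-','e','n','e','r','g','y','}','}'] : List Char) = tok5 from rfl]
      rw [show ([',', ','] ++ m : List Char) = ',' :: ',' :: m from rfl, scanTokens]
      simp only [List.isPrefixOf_cons₂, List.isPrefixOf_nil_left, BEq.rfl, Bool.and_self, if_true, List.drop_succ_cons, List.drop_zero]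
      rw [ih m (by simp at hl; omega)]
    · by_cases hp2 : (['_', '_'] : List Char).isPrefixOf l
      · obtain ⟨m, rfl⟩ : ∃ m, l = ['_', '_'] ++ m :=
          ⟨List.drop 2 l, by simpa using (List.prefix_iff_eq_append.mp (List.isPrefixOf_iff_prefix.mp hp2)).symm⟩
        rw [replace_passthrough ',' [','] _ ['_','_'] _ (by simp),
            replace_match _ _ _ (by simp),
            replace_passthrough '^' ['^'] _ ['<','/','s','u','b','>'] _ (by simp),
            replace_passthrough '*' ['*'] _ ['<','/','s','u','b','>'] _ (by simp),
            show tok5 = '{' :: ['{','u','n','i','t','s','-','e','n','e','r','g','y','}','}'] from rfl,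
            replace_passthrough '{' _ _ ['<','/','s','u','b','>'] _ (by simp),
            show ('{' :: ['{','u','n','i','t','s','-','e','n','e','r','g','y','}','}'] : List Char) = tok5 from rfl]
        rw [show (['_', '_'] ++ m : List Char) = '_' :: '_' :: m from rfl, scanTokens]
        rw [if_neg (show ¬ (([',',','] : List Char).isPrefixOf ('_' :: '_' :: m) = true) from by simp), if_pos (show (['_','_'] : List Char).isPrefixOf ('_' :: '_' :: m) = true from by simp)]
        rw [List.drop_succ_cons, List.drop_succ_cons, List.drop_zero, ih m (by simp at hl; omega)]
      · by_cases hp3 : (['^', '^'] : List Char).isPrefixOf l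
        · obtain ⟨m, rfl⟩ : ∃ m, l = ['^', '^'] ++ m :=
            ⟨List.drop 2 l, by simpa using (List.prefix_iff_eq_append.mp (List.isPrefixOf_iff_prefix.mp hp3)).symm⟩
          rw [replace_passthrough ',' [','] _ ['^','^'] _ (by simp),
              replace_passthrough '_' ['_'] _ ['^','^'] _ (by simp),
              replace_match _ _ _ (by simp),
              replace_passthrough '*' ['*'] _ ['<','s','u','p','>'] _ (by simp),
              show tok5 = '{' :: ['{','u','n','i','t','s','-','e','n','e','r','g','y','}','}'] from rfl,
              replace_passthrough '{' _ _ ['<','s','u','p','>'] _ (by simp),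
              show ('{' :: ['{','u','n','i','t','s','-','e','n','e','r','g','y','}','}'] : List Char) = tok5 from rfl]
          rw [show (['^', '^'] ++ m : List Char) = '^' :: '^' :: m from rfl, scanTokens]
          rw [if_neg (show ¬ (([',',','] : List Char).isPrefixOf ('^' :: '^' :: m) = true) from by simp), if_neg (show ¬ ((['_','_'] : List Char).isPrefixOf ('^' :: '^' :: m) = true) from by simp), if_pos (show (['^','^'] : List Char).isPrefixOf ('^' :: '^' :: m) = true from by simp)]
          rw [List.drop_succ_cons, List.drop_succ_cons, List.drop_zero, ih m (by simp at hl; omega)]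
        · by_cases hp4 : (['*', '*'] : List Char).isPrefixOf l
          · obtain ⟨m, rfl⟩ : ∃ m, l = ['*', '*'] ++ m :=
              ⟨List.drop 2 l, by simpa using (List.prefix_iff_eq_append.mp (List.isPrefixOf_iff_prefix.mp hp4)).symm⟩
            rw [replace_passthrough ',' [','] _ ['*','*'] _ (by simp),
                replace_passthrough '_' ['_'] _ ['*','*'] _ (by simp),
                replace_passthrough '^' ['^'] _ ['*','*'] _ (by simp),
                replace_match _ _ _ (by simp),
                show tok5 = '{' :: ['{','u','n','i','t','s','-','e','n','e','r','g','y','}','}'] from rfl,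
                replace_passthrough '{' _ _ ['<','/','s','u','p','>'] _ (by simp),
                show ('{' :: ['{','u','n','i','t','s','-','e','n','e','r','g','y','}','}'] : List Char) = tok5 from rfl]
            rw [show (['*', '*'] ++ m : List Char) = '*' :: '*' :: m from rfl, scanTokens]
            rw [if_neg (show ¬ (([',',','] : List Char).isPrefixOf ('*' :: '*' :: m) = true) from by simp), if_neg (show ¬ ((['_','_'] : List Char).isPrefixOf ('*' :: '*' :: m) = true) from by simp), if_neg (show ¬ ((['^','^'] : List Char).isPrefixOf ('*' :: '*' :: m) = true) from by simp), if_pos (show (['*','*'] : List Char).isPrefixOf ('*' :: '*' :: m) = true from by simp)]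
            rw [List.drop_succ_cons, List.drop_succ_cons, List.drop_zero, ih m (by simp at hl; omega)]
          · by_cases hp5 : tok5.isPrefixOf l
            · obtain ⟨m, rfl⟩ : ∃ m, l = tok5 ++ m :=
                ⟨List.drop tok5.length l, (List.prefix_iff_eq_append.mp (List.isPrefixOf_iff_prefix.mp hp5)).symm⟩
              rw [show (tok5 ++ m : List Char) = '{' :: ['{','u','n','i','t','s','-','e','n','e','r','g','y','}','}'] ++ m from rfl]
              rw [replace_passthrough ',' [','] _ _ _ (by simp),
                  replace_passthrough '_' ['_'] _ _ _ (by simp),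
                  replace_passthrough '^' ['^'] _ _ _ (by simp),
                  replace_passthrough '*' ['*'] _ _ _ (by simp)]
              rw [show ('{' :: ['{','u','n','i','t','s','-','e','n','e','r','g','y','}','}'] : List Char) = tok5 from rfl,
                  replace_match _ _ _ (by simp [tok5])]
              rw [show (tok5 ++ m : List Char) = '{' :: ('{' :: ('u' :: ('n' :: ('i' :: ('t' :: ('s' :: ('-' :: ('e' :: ('n' :: ('e' :: ('r' :: ('g' :: ('y' :: ('}' :: ('}' :: m))))))))))))))) from rfl, scanTokens]
              rw [if_neg (show ¬ (([',',','] : List Char).isPrefixOf ('{' :: ('{' :: ('u' :: ('n' :: ('i' :: ('t' :: ('s' :: ('-' :: ('e' :: ('n' :: ('e' :: ('r' :: ('g' :: ('y' :: ('}' :: ('}' :: m)))))))))))))))) = true) from by simp), if_neg (show ¬ ((['_','_'] : List Char).isPrefixOf ('{' :: ('{' :: ('u' :: ('n' :: ('i' :: ('t' :: ('s' :: ('-' :: ('e' :: ('n' :: ('e' :: ('r' :: ('g' :: ('y' :: ('}' :: ('}' :: m)))))))))))))))) = true) from by simp), if_neg (show ¬ ((['^','^'] : List Char).isPrefixOf ('{'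 :: ('{' :: ('u' :: ('n' :: ('i' :: ('t' :: ('s' :: ('-' :: ('e' :: ('n' :: ('e' :: ('r' :: ('g' :: ('y' :: ('}' :: ('}' :: m)))))))))))))))) = true) from by simp), if_neg (show ¬ ((['*','*'] : List Char).isPrefixOf ('{' :: ('{' :: ('u' :: ('n' :: ('i' :: ('t' :: ('s' :: ('-' :: ('e' :: ('n' :: ('e' :: ('r' :: ('g' :: ('y' :: ('}' :: ('}' :: m)))))))))))))))) = true) from by simp), if_pos (show tok5.isPrefixOf ('{' :: ('{' :: ('u' :: ('n' :: ('i' :: ('t' :: ('s' :: ('-' :: ('e' :: ('n' :: ('e' :: ('r' :: ('g' :: ('y' :: ('}' :: ('}' :: m)))))))))))))))) = true from by simp [tok5])]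
              have hdrop : List.drop 16 ('{' :: ('{' :: ('u' :: ('n' :: ('i' :: ('t' :: ('s' :: ('-' :: ('e' :: ('n' :: ('e' :: ('r' :: ('g' :: ('y' :: ('}' :: ('}' :: m)))))))))))))))) = m := rfl
              rw [hdrop, ih m (by simp [tok5] at hl; omega)]
            · cases l with
              | nil =>
                rw [replace_nil _ _ (by simp), replace_nil _ _ (by simp), replace_nil _ _ (by simp),
                    replace_nil _ _ (by simp), replace_nil _ _ (by simp [tok5]), scanTokens]
              | cons c m =>
                have e1 := replace_cons_neg [',',','] ['<','s','u','b','>'] c m (by simp) hp1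
                have h2 : ¬ (['_','_'] : List Char).isPrefixOf (c :: PySem.Chars.replace m [',',','] ['<','s','u','b','>']) := by
                  intro h
                  exact hp2 (replace_prefix_reflect [',',','] ['<','s','u','b','>'] (by simp) _ rfl (c :: m) ['_','_'] (by simp) (by rw [e1]; exact h))
                have e2 := replace_cons_neg ['_','_'] ['<','/','s','u','b','>'] c (PySem.Chars.replace m [',',','] ['<','s','u','b','>']) (by simp) h2
                have h3 : ¬ (['^','^'] : List Char).isPrefixOf (c :: PySem.Chars.replace (PySem.Chars.replace m [',',','] ['<','s','u','b','>']) ['_','_'] ['<','/','s','u','b','>']) := by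
                  intro h
                  apply hp3
                  apply replace_prefix_reflect [',',','] ['<','s','u','b','>'] (by simp) _ rfl (c :: m) ['^','^'] (by simp)
                  rw [e1]
                  apply replace_prefix_reflect ['_','_'] ['<','/','s','u','b','>'] (by simp) _ rfl _ ['^','^'] (by simp)
                  rw [e2]; exact h
                have e3 := replace_cons_neg ['^','^'] ['<','s','u','p','>'] c (PySem.Chars.replace (PySem.Chars.replace m [',',','] ['<','s','u','b','>']) ['_','_'] ['<','/','s','u','b','>']) (by simp) h3
                have h4 : ¬ (['*','*'] : List Char).isPrefixOf (c :: PySem.Chars.replace (PySem.Chars.replace (PySem.Chars.replace m [',',','] ['<','s','u','b','>']) ['_','_'] ['<','/','s','u','b','>']) ['^','^'] ['<','s','u','p','>']) := by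
                  intro h
                  apply hp4
                  apply replace_prefix_reflect [',',','] ['<','s','u','b','>'] (by simp) _ rfl (c :: m) ['*','*'] (by simp)
                  rw [e1]
                  apply replace_prefix_reflect ['_','_'] ['<','/','s','u','b','>'] (by simp) _ rfl _ ['*','*'] (by simp)
                  rw [e2]
                  apply replace_prefix_reflect ['^','^'] ['<','s','u','p','>'] (by simp) _ rfl _ ['*','*'] (by simp)
                  rw [e3]; exact h
                have e4 := replace_cons_neg ['*','*'] ['<','/','s','u','p','>'] c (PySem.Chars.replace (PySem.Chars.replace (PySem.Chars.replace m [',',','] ['<','s','u','b','>']) ['_','_'] ['<','/','s','u','b','>']) ['^','^'] ['<','s','u','p','>']) (by simp) h4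
                have h5 : ¬ tok5.isPrefixOf (c :: PySem.Chars.replace (PySem.Chars.replace (PySem.Chars.replace (PySem.Chars.replace m [',',','] ['<','s','u','b','>']) ['_','_'] ['<','/','s','u','b','>']) ['^','^'] ['<','s','u','p','>']) ['*','*'] ['<','/','s','u','p','>']) := by
                  intro h
                  apply hp5
                  apply replace_prefix_reflect [',',','] ['<','s','u','b','>'] (by simp) _ rfl (c :: m) tok5 (by simp [tok5])
                  rw [e1]
                  apply replace_prefix_reflect ['_','_'] ['<','/','s','u','b','>'] (by simp) _ rfl _ tok5 (by simp [tok5])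
                  rw [e2]
                  apply replace_prefix_reflect ['^','^'] ['<','s','u','p','>'] (by simp) _ rfl _ tok5 (by simp [tok5])
                  rw [e3]
                  apply replace_prefix_reflect ['*','*'] ['<','/','s','u','p','>'] (by simp) _ rfl _ tok5 (by simp [tok5])
                  rw [e4]; exact h
                have e5 := replace_cons_neg tok5 (if units then rep5 else []) c (PySem.Chars.replace (PySem.Chars.replace (PySem.Chars.replace (PySem.Chars.replace m [',',','] ['<','s','u','b','>']) ['_','_'] ['<','/','s','u','b','>']) ['^','^'] ['<','s','u','p','>']) ['*','*'] ['<','/','s','u','p','>']) (by simp [tok5]) h5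
                rw [e1, e2, e3, e4, e5, scanTokens]
                rw [if_neg hp1, if_neg hp2, if_neg hp3, if_neg hp4, if_neg hp5]
                rw [ih m (by simp at hl; omega)]

-- unfolding of port A at each Boolean: the dict items its foldl walks, written out (definitional)
theorem strA_true (s : String) : str2html s true = String.ofList (PySem.Chars.replace (PySem.Chars.replace (PySem.Chars.replace (PySem.Chars.replace (PySem.Chars.replace s.toList [',',','] ['<','s','u','b','>']) ['_','_'] ['<','/','s','u','b','>']) ['^','^'] ['<','s','u','p','>']) ['*','*'] ['<','/','s','u','p','>']) tok5 (if (true : Bool) then rep5 else [])) := by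
  show PySem.Str.replace (PySem.Str.replace (PySem.Str.replace (PySem.Str.replace (PySem.Str.replace s ",," "<sub>") "__" "</sub>") "^^" "<sup>") "**" "</sup>") "{{units-energy}}" ", <span class=units-energy></span>" = _
  simp only [PySem.Str.replace, String.toList_ofList]
  rfl

theorem strA_false (s : String) : str2html s false = String.ofList (PySem.Chars.replace (PySem.Chars.replace (PySem.Chars.replace (PySem.Chars.replace (PySem.Chars.replace s.toList [',',','] ['<','s','u','b','>']) ['_','_'] ['<','/','s','u','b','>']) ['^','^'] ['<','s','u','p','>']) ['*','*'] ['<','/','s','u','p','>']) tok5 (if (false : Bool) then rep5 else [])) := by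
  show PySem.Str.replace (PySem.Str.replace (PySem.Str.replace (PySem.Str.replace (PySem.Str.replace s ",," "<sub>") "__" "</sub>") "^^" "<sup>") "**" "</sup>") "{{units-energy}}" "" = _
  simp only [PySem.Str.replace, String.toList_ofList]
  rfl

-- ===== VERDICT (by name: the statement is the Claim_ definition above) =====
theorem str2html_spec : Claim_equal_str2html := by
  intro s units _
  show str2html s units = str2html_alt s units
  cases units
  · exact (strA_false s).trans (congrArg String.ofList (chars_main false s.toList.length s.toList (le_refl _)))
  · exact (strA_true s).trans (congrArg String.ofList (chars_main true s.toList.length s.toList (le_refl _)))
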